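-- pv_equiv track=rewrite | github.com/dylanlmeraki/Inspections_OS | mirror-pack-agent/acquisition/engine.py | derive_overall_status
-- ===== SOURCE A (Python) =====
-- from typing import Any
--
-- def derive_overall_status(attempts: list[dict[str, Any]]) -> str:
--     if not attempts:
--         return "fetch_failed"
--     for preferred_status in (
--         "direct_mirror_downloaded",
--         "source_reference_verified",
--         "html_page_snapshotted",
--         "pdf_link_discovered_not_downloaded",
--         "requires_manual_login",
--         "requires_manual_review",
--         "ambiguous_source",
--         "superseded_source",
--         "obsolete_source",
--         "http_error",
--         "wrong_content_type",
--         "fetch_failed",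
--     ):
--         if any(attempt.get("status") == preferred_status for attempt in attempts):
--             return preferred_status
--     return "fetch_failed"
-- ===== SOURCE B (Python) =====
-- _STATUS_PRIORITY = (
--     "direct_mirror_downloaded",
--     "source_reference_verified",
--     "html_page_snapshotted",
--     "pdf_link_discovered_not_downloaded",
--     "requires_manual_login",
--     "requires_manual_review",
--     "ambiguous_source",
--     "superseded_source",
--     "obsolete_source",
--     "http_error",
--     "wrong_content_type",
--     "fetch_failed",
-- )
-- _RANK = {s: i for i, s in enumerate(_STATUS_PRIORITY)}
--
-- def derive_overall_status(attempts):
--     best = None  # (rank, status) of the highest-priority recognized status so far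
--     for attempt in attempts:
--         status = attempt.get("status")
--         rank = _RANK.get(status)
--         if rank is not None and (best is None or rank < best[0]):
--             best = (rank, status)
--     return best[1] if best is not None else "fetch_failed"
-- ===== Notes on version B (the rewrite author's own statement) =====
-- stated objective: alternative
-- what changed: Replaced the priority-outer loop (which rescans all attempts for each of the 12 statuses) by a single pass over attempts tracking the minimum priority rank via a precomputed status->rank dict.
import Mathlib
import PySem

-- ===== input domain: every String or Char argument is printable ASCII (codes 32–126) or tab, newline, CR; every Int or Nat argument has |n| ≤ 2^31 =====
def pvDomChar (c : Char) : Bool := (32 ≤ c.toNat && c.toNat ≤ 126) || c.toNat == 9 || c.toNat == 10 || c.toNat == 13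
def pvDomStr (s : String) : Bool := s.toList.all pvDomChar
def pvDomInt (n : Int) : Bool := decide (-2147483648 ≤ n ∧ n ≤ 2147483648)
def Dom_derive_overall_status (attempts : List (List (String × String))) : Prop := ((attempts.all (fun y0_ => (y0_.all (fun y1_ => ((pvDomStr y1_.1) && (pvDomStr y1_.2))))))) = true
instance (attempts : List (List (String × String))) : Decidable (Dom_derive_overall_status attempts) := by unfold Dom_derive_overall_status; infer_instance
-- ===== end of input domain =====

-- B replaces A's priority-outer rescan of attempts (one pass per listed status) by a single
-- pass over attempts tracking the minimum priority rank via a status→rank dict (objective: alternative).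

-- attempt.get("status") on an association-list dict: first match, none if absent (exact)
def pvGetKey (d : List (String × String)) (k : String) : Option String :=
  (d.find? (fun p => p.1 == k)).map (·.2)

-- the ordered status tuple shared by both Pythons
def pvStatuses : List String :=
  [ "direct_mirror_downloaded",
    "source_reference_verified",
    "html_page_snapshotted",
    "pdf_link_discovered_not_downloaded",
    "requires_manual_login",
    "requires_manual_review",
    "ambiguous_source",
    "superseded_source",
    "obsolete_source",
    "http_error",
    "wrong_content_type",
    "fetch_failed" ]

-- ===== PORT A =====
def derive_overall_status (attempts : List (List (String × String))) : String :=
  if attempts.isEmpty then "fetch_failed"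
  else
    match pvStatuses.find? (fun s => attempts.any (fun a => pvGetKey a "status" == some s)) with
    | some s => s
    | none => "fetch_failed"

-- ===== PORT B =====
-- _RANK = {s: i for i, s in enumerate(_STATUS_PRIORITY)}
def pvRank : PySem.Dict String Int :=
  PySem.Dict.ofList ((PySem.List.enumerate pvStatuses).map (fun p => (p.2, p.1)))

def derive_overall_status_alt (attempts : List (List (String × String))) : String :=
  let best := attempts.foldl
    (fun (best : Option (Int × String)) a =>
      match pvGetKey a "status" with
      | none => best
      | some s =>
        match PySem.Dict.get? pvRank s with
        | none => best
        | some r =>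
          match best with
          | none => some (r, s)
          | some b => if r < b.1 then some (r, s) else some b) none
  match best with
  | some b => b.2
  | none => "fetch_failed"

-- ===== PRECONDITION & SPEC =====
def Spec_derive_overall_status (attempts : List (List (String × String))) (out : String) : Prop := out = derive_overall_status_alt attempts
instance (attempts : List (List (String × String))) (out : String) : Decidable (Spec_derive_overall_status attempts out) := by unfold Spec_derive_overall_status; infer_instance

-- ===== CLAIM (what is proved, stated in full; the proofs are below) =====
def Claim_equal_derive_overall_status : Prop := ∀ (attempts : List (List (String × String))), Dom_derive_overall_status attempts → Spec_derive_overall_status attempts (derive_overall_status attempts)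

-- ===== LEMMAS AND PROOFS =====

-- B's loop step, named for the proofs
def pvStep (best : Option (Int × String)) (a : List (String × String)) : Option (Int × String) :=
  match pvGetKey a "status" with
  | none => best
  | some s =>
    match PySem.Dict.get? pvRank s with
    | none => best
    | some r =>
      match best with
      | none => some (r, s)
      | some b => if r < b.1 then some (r, s) else some b

-- the recognized (rank, status) of one attempt
def pvRecog (a : List (String × String)) : Option (Int × String) :=
  (pvGetKey a "status").bind (fun s => (PySem.Dict.get? pvRank s).map (fun r => (r, s)))

-- left-biased min-by-rank merge
def pvG (x y : Option (Int × String)) : Option (Int × String) :=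
  match y with
  | none => x
  | some q =>
    match x with
    | none => some q
    | some b => if q.1 < b.1 then some q else some b

theorem pvAlt_eq (attempts : List (List (String × String))) :
    derive_overall_status_alt attempts =
      match attempts.foldl pvStep none with
      | some b => b.2
      | none => "fetch_failed" := rfl

theorem pvStep_eq (acc : Option (Int × String)) (a : List (String × String)) :
    pvStep acc a = pvG acc (pvRecog a) := by
  unfold pvStep pvRecog pvG
  cases hg : pvGetKey a "status" with
  | none => cases acc <;> rfl
  | some s =>
    cases hk : PySem.Dict.get? pvRank s <;>
      simp only [hk, Option.bind_some, Option.map_none, Option.map_some]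

theorem pvG_none_left (x : Option (Int × String)) : pvG none x = x := by
  cases x <;> rfl

theorem pvG_assoc (x y z : Option (Int × String)) : pvG (pvG x y) z = pvG x (pvG y z) := by
  rcases x with _ | b
  · rcases y with _ | q
    · rcases z with _ | r <;> rfl
    · rcases z with _ | r
      · rfl
      · by_cases h : r.1 < q.1 <;> simp [pvG, h]
  · rcases y with _ | q
    · rcases z with _ | r <;> rfl
    · rcases z with _ | r
      · rfl
      · by_cases h1 : q.1 < b.1 <;> by_cases h2 : r.1 < q.1 <;> by_cases h3 : r.1 < b.1 <;>
          simp [pvG, h1, h2, h3] <;> (exfalso; omega)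

theorem pvFoldl_g (l : List (List (String × String))) :
    ∀ acc, l.foldl pvStep acc = pvG acc (l.foldl pvStep none) := by
  induction l with
  | nil => intro acc; rfl
  | cons a t ih =>
    intro acc
    simp only [List.foldl_cons]
    rw [ih (pvStep acc a), ih (pvStep none a), pvStep_eq, pvStep_eq, pvG_none_left, pvG_assoc]

theorem pvM_cons (a : List (String × String)) (t : List (List (String × String))) :
    (a :: t).foldl pvStep none = pvG (pvRecog a) (t.foldl pvStep none) := by
  simp only [List.foldl_cons]
  rw [pvFoldl_g, pvStep_eq, pvG_none_left]

theorem pvM_none {l : List (List (String × String))} (h : l.foldl pvStep none = none) :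
    ∀ a ∈ l, pvRecog a = none := by
  induction l with
  | nil => intro a ha; cases ha
  | cons a t ih =>
    rw [pvM_cons] at h
    intro b hb
    have hr : pvRecog a = none ∧ t.foldl pvStep none = none := by
      cases hy : t.foldl pvStep none with
      | none =>
        cases hx : pvRecog a with
        | none => exact ⟨rfl, rfl⟩
        | some q => rw [hy, hx] at h; simp [pvG] at h
      | some p =>
        cases hx : pvRecog a with
        | none => rw [hy, hx] at h; simp [pvG] at h
        | some q => rw [hy, hx] at h; simp only [pvG] at h; split_ifs at h
    rcases List.mem_cons.mp hb with rfl | hb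
    · exact hr.1
    · exact ih hr.2 b hb

theorem pvRecog_some {a : List (String × String)} {r : Int} {s : String}
    (h : pvRecog a = some (r, s)) :
    pvGetKey a "status" = some s ∧ PySem.Dict.get? pvRank s = some r := by
  unfold pvRecog at h
  cases hg : pvGetKey a "status" with
  | none => simp [hg] at h
  | some s' =>
    cases hk : PySem.Dict.get? pvRank s' with
    | none => simp [hg, hk] at h
    | some r' => simp [hg, hk] at h; exact ⟨by rw [h.2], by rw [← h.1, ← h.2]; exact hk⟩

theorem pvM_some {l : List (List (String × String))} {r : Int} {s : String}
    (h : l.foldl pvStep none = some (r, s)) :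
    PySem.Dict.get? pvRank s = some r ∧
    (∃ a ∈ l, pvGetKey a "status" = some s) ∧
    (∀ a ∈ l, ∀ s' r', pvGetKey a "status" = some s' →
        PySem.Dict.get? pvRank s' = some r' → r ≤ r') := by
  induction l generalizing r s with
  | nil => simp [List.foldl] at h
  | cons a t ih =>
    rw [pvM_cons] at h
    cases hx : pvRecog a with
    | none =>
      rw [hx, pvG_none_left] at h
      obtain ⟨h1, ⟨b, hb, hb2⟩, h3⟩ := ih h
      refine ⟨h1, ⟨b, List.mem_cons_of_mem _ hb, hb2⟩, ?_⟩
      intro c hc s' r' hcs hcr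
      rcases List.mem_cons.mp hc with rfl | hc
      · exfalso
        have : pvRecog c = some (r', s') := by
          unfold pvRecog; rw [hcs]; simp [hcr]
        rw [hx] at this; cases this
      · exact h3 c hc s' r' hcs hcr
    | some q =>
      obtain ⟨rq, sq⟩ := q
      have hqa := pvRecog_some hx
      cases hy : t.foldl pvStep none with
      | none =>
        rw [hx, hy] at h
        simp [pvG] at h
        obtain ⟨h1, h2⟩ := h; subst h1; subst h2
        refine ⟨hqa.2, ⟨a, List.mem_cons_self, hqa.1⟩, ?_⟩
        intro c hc s' r' hcs hcr
        rcases List.mem_cons.mp hc with rfl | hc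
        · rw [hqa.1] at hcs; cases hcs
          rw [hqa.2] at hcr; cases hcr; exact le_refl _
        · exfalso
          have : pvRecog c = some (r', s') := by
            unfold pvRecog; rw [hcs]; simp [hcr]
          rw [pvM_none hy c hc] at this; cases this
      | some p =>
        obtain ⟨rp, sp⟩ := p
        obtain ⟨p1, ⟨b, hb, hb2⟩, p3⟩ := ih hy
        rw [hx, hy] at h
        simp only [pvG] at h
        by_cases hlt : rp < rq
        · rw [if_pos hlt] at h
          cases h
          refine ⟨p1, ⟨b, List.mem_cons_of_mem _ hb, hb2⟩, ?_⟩
          intro c hc s' r' hcs hcr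
          rcases List.mem_cons.mp hc with rfl | hc
          · rw [hqa.1] at hcs; cases hcs
            rw [hqa.2] at hcr; cases hcr; omega
          · exact p3 c hc s' r' hcs hcr
        · rw [if_neg hlt] at h
          cases h
          refine ⟨hqa.2, ⟨a, List.mem_cons_self, hqa.1⟩, ?_⟩
          intro c hc s' r' hcs hcr
          rcases List.mem_cons.mp hc with rfl | hc
          · rw [hqa.1] at hcs; cases hcs
            rw [hqa.2] at hcr; cases hcr; exact le_refl _
          · have := p3 c hc s' r' hcs hcr; omega

-- every key of the rank dict names an index into pvStatuses
set_option maxHeartbeats 2000000 in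
theorem pvRank_eq_mk : pvRank = PySem.Dict.mk
    [ ("direct_mirror_downloaded", (0 : Int)),
      ("source_reference_verified", 1),
      ("html_page_snapshotted", 2),
      ("pdf_link_discovered_not_downloaded", 3),
      ("requires_manual_login", 4),
      ("requires_manual_review", 5),
      ("ambiguous_source", 6),
      ("superseded_source", 7),
      ("obsolete_source", 8),
      ("http_error", 9),
      ("wrong_content_type", 10),
      ("fetch_failed", 11) ] := by decide

theorem pvRank_some {s : String} {r : Int} (h : PySem.Dict.get? pvRank s = some r) :
    0 ≤ r ∧ r.toNat < 12 ∧ pvStatuses[r.toNat]? = some s := by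
  have hm := PySem.Dict.mem_items_of_get?_eq_some _ h
  rw [pvRank_eq_mk] at hm
  simp only [List.mem_cons, List.not_mem_nil, or_false, Prod.mk.injEq] at hm
  rcases hm with ⟨rfl, rfl⟩ | ⟨rfl, rfl⟩ | ⟨rfl, rfl⟩ | ⟨rfl, rfl⟩ | ⟨rfl, rfl⟩ | ⟨rfl, rfl⟩ |
    ⟨rfl, rfl⟩ | ⟨rfl, rfl⟩ | ⟨rfl, rfl⟩ | ⟨rfl, rfl⟩ | ⟨rfl, rfl⟩ | ⟨rfl, rfl⟩ <;> decide

-- each listed status has its own index as rank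
set_option maxHeartbeats 2000000 in
theorem pvRank_idx : ∀ k : Nat, k < 12 →
    PySem.Dict.get? pvRank (pvStatuses.getD k "") = some (k : Int) := by decide

set_option maxHeartbeats 2000000 in
theorem pvStatuses_isSome : ∀ s ∈ pvStatuses, (PySem.Dict.get? pvRank s).isSome := by decide

-- first-match over a list whose prefix fails and position k succeeds
theorem pvFind_at {α} (p : α → Bool) :
    ∀ (l : List α) (k : Nat) (hk : k < l.length),
      (∀ j (hj : j < l.length), j < k → p l[j] = false) →
      p l[k] = true → l.find? p = some l[k] := by
  intro l
  induction l with
  | nil => intro k hk; simp at hk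
  | cons x t ih =>
    intro k hk hpre hk2
    cases k with
    | zero =>
      rw [List.find?_cons_of_pos (by simpa using hk2)]
      rfl
    | succ k =>
      have hx : p x = false := by simpa using hpre 0 (by simp) (by omega)
      rw [List.find?_cons_of_neg (by simp [hx])]
      have := ih k (by simpa using hk)
        (fun j hj hjk => by simpa using hpre (j + 1) (by simpa using hj) (by omega))
        (by simpa using hk2)
      simpa using this

theorem pvMain (attempts : List (List (String × String))) :
    derive_overall_status attempts = derive_overall_status_alt attempts := by
  cases attempts with
  | nil => rfl
  | cons a0 t0 =>
    rw [pvAlt_eq]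
    set l := a0 :: t0 with hl
    unfold derive_overall_status
    rw [if_neg (by simp [hl])]
    cases hm : l.foldl pvStep none with
    | none =>
      have hno := pvM_none hm
      have hfn : pvStatuses.find?
          (fun s => l.any (fun a => pvGetKey a "status" == some s)) = none := by
        rw [List.find?_eq_none]
        intro s hs hp
        simp only [List.any_eq_true] at hp
        obtain ⟨a, ha, hpa⟩ := hp
        have hga : pvGetKey a "status" = some s := by
          cases hg : pvGetKey a "status" <;> rw [hg] at hpa
          · cases hpa
          · simpa using hpa
        obtain ⟨r, hr⟩ := Option.isSome_iff_exists.mp (pvStatuses_isSome s hs)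
        have : pvRecog a = some (r, s) := by
          unfold pvRecog; rw [hga]; simp [hr]
        rw [hno a ha] at this; cases this
      rw [hfn]
    | some p =>
      obtain ⟨r, s⟩ := p
      obtain ⟨hrk, ⟨b, hb, hbs⟩, hmin⟩ := pvM_some hm
      obtain ⟨hr0, hr12, hget⟩ := pvRank_some hrk
      have hlen : pvStatuses.length = 12 := by decide
      have hks : pvStatuses[r.toNat] = s := by
        rw [List.getElem?_eq_getElem (by omega)] at hget
        exact Option.some.inj hget
      have hfind : pvStatuses.find?
          (fun s' => l.any (fun a => pvGetKey a "status" == some s')) =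
            some pvStatuses[r.toNat] := by
        apply pvFind_at _ _ r.toNat (by omega)
        · intro j hj hjr
          by_contra hcon
          simp only [Bool.not_eq_false, List.any_eq_true] at hcon
          obtain ⟨a, ha, hpa⟩ := hcon
          have hga : pvGetKey a "status" = some pvStatuses[j] := by
            cases hg : pvGetKey a "status" <;> rw [hg] at hpa
            · cases hpa
            · simpa using hpa
          have hrj : PySem.Dict.get? pvRank pvStatuses[j] = some (j : Int) := by
            have := pvRank_idx j (by omega)
            rwa [List.getD_eq_getElem _ _ (by omega)] at this
          have := hmin a ha _ _ hga hrj
          omega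
        · simp only [List.any_eq_true]
          refine ⟨b, hb, ?_⟩
          simp only [hbs, beq_iff_eq, Option.some.injEq]
          exact hks.symm
      rw [hfind]
      exact hks

-- ===== VERDICT (by name: the statement is the Claim_ definition above) =====
theorem derive_overall_status_spec : Claim_equal_derive_overall_status := by
  intro attempts _
  unfold Spec_derive_overall_status
  exact pvMain attempts
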